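-- pv_equiv track=rewrite | github.com/drogan-v/vk_algos | homework_04/solutions.py | min_max_product_bst
-- ===== SOURCE A (Python) =====
-- from typing import Optional
--
-- class TreeNode:
--     def __init__(self, val: int | None=0, left=None, right=None):
--         self.val = val
--         self.left = left
--         self.right = right
--
-- def build_tree(arr: list[Optional[int]], i: int) -> Optional[TreeNode]:
--     """
--     Восстановить бинарное дерево из массива, заданного в level-order.
--
--     Для узла с индексом i:
--     - левый потомок находится в позиции 2 * i + 1;
--     - правый потомок находится в позиции 2 * i + 2.
--
--     Если в массиве на позиции стоит None, это означает отсутствие узла.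
--     Узлы создаются рекурсивно и связываются через объекты TreeNode.
--     """
--     if i >= len(arr) or arr[i] is None:
--         return None
--
--     root = TreeNode(arr[i])
--     root.left = build_tree(arr, 2 * i + 1)
--     root.right = build_tree(arr, 2 * i + 2)
--
--     return root
--
-- def min_max_product_bst(data: list[int]):
--     """
--     Восстановить BST из массива и вернуть произведение минимального
--     и максимального элементов.
--
--     Для BST минимальный элемент лежит в крайней левой ветви,
--     а максимальный - в крайней правой, поэтому поиск крайних узлов
--     выполняется за O(h), где h - высота дерева.
--     """
--     root = build_tree(data, 0)
--
--     if not root: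
--         return None
--
--     min_node = root
--     while min_node.left:
--         min_node = min_node.left
--
--     max_node = root
--     while max_node.right:
--         max_node = max_node.right
--
--     return min_node.val * max_node.val
-- ===== SOURCE B (Python) =====
-- def min_max_product_bst(data: list[int]):
--     """Trace the leftmost/rightmost child indices over the level-order
--     array directly, without building the tree: O(h) = O(log n)."""
--     if not data:
--         return None
--     n = len(data)
--     i = 0
--     while 2 * i + 1 < n:
--         i = 2 * i + 1
--     j = 0
--     while 2 * j + 2 < n:
--         j = 2 * j + 2
--     return data[i] * data[j]
-- ===== Notes on version B (the rewrite author's own statement) =====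
-- stated objective: faster
-- what changed: B never builds the tree: it follows the leftmost-child (2i+1) and rightmost-child (2j+2) index chains over the level-order array directly, replacing A's O(n) recursive tree construction.
import Mathlib
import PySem

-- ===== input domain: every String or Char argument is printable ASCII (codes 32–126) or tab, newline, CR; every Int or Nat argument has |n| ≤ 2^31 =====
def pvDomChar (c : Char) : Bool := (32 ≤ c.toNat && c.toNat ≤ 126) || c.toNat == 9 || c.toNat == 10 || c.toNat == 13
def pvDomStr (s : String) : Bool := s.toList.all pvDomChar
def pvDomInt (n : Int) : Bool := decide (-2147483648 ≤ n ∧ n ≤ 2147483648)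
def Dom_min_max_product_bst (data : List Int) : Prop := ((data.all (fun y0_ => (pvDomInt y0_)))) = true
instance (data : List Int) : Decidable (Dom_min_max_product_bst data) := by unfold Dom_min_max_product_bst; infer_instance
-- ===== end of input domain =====

-- B traces the leftmost/rightmost child index chains over the array instead of building A's tree (faster: O(log n) vs O(n)).

-- ===== PORT A =====
-- TreeNode / build_tree: on a list[int] the `arr[i] is None` test never fires, so a node exists iff i < len(arr).
inductive PyTree where
  | nil : PyTree
  | node : Int → PyTree → PyTree → PyTree
deriving DecidableEq, Repr

def build_tree (arr : List Int) (i : Nat) : PyTree :=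
  if h : i < arr.length then
    .node arr[i] (build_tree arr (2 * i + 1)) (build_tree arr (2 * i + 2))
  else
    .nil
termination_by arr.length - i
decreasing_by all_goals omega

-- `min_node = root; while min_node.left: min_node = min_node.left; min_node.val`
def minVal : PyTree → Int
  | .nil => 0          -- unreachable: called only on a non-nil root
  | .node v .nil _ => v
  | .node _ (.node w l r) _ => minVal (.node w l r)

-- `max_node = root; while max_node.right: max_node = max_node.right; max_node.val`
def maxVal : PyTree → Int
  | .nil => 0          -- unreachable: called only on a non-nil root
  | .node v _ .nil => v
  | .node _ _ (.node w l r) => maxVal (.node w l r)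

def min_max_product_bst (data : List Int) : Option Int :=
  match build_tree data 0 with
  | .nil => none
  | root => some (minVal root * maxVal root)

-- ===== PORT B =====
-- `while 2*i+1 < n: i = 2*i+1`
def traceL (n i : Nat) : Nat :=
  if 2 * i + 1 < n then traceL n (2 * i + 1) else i
termination_by n - i
decreasing_by omega

-- `while 2*j+2 < n: j = 2*j+2`
def traceR (n j : Nat) : Nat :=
  if 2 * j + 2 < n then traceR n (2 * j + 2) else j
termination_by n - j
decreasing_by omega

def min_max_product_bst_alt (data : List Int) : Option Int :=
  if data = [] then none
  else
    let n := data.length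
    some (data.getD (traceL n 0) 0 * data.getD (traceR n 0) 0)

-- ===== PRECONDITION & SPEC =====
def Spec_min_max_product_bst (data : List Int) (out : Option Int) : Prop := out = min_max_product_bst_alt data
instance (data : List Int) (out : Option Int) : Decidable (Spec_min_max_product_bst data out) := by unfold Spec_min_max_product_bst; infer_instance

-- ===== CLAIM (what is proved, stated in full; the proofs are below) =====
def Claim_equal_min_max_product_bst : Prop := ∀ (data : List Int), Dom_min_max_product_bst data → Spec_min_max_product_bst data (min_max_product_bst data)

-- ===== LEMMAS AND PROOFS =====

theorem build_tree_eq_nil (arr : List Int) (i : Nat) :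
    build_tree arr i = .nil ↔ ¬ i < arr.length := by
  rw [build_tree]
  split
  · simp_all
  · simp_all

theorem minVal_build (arr : List Int) (i : Nat) (h : i < arr.length) :
    minVal (build_tree arr i) = arr.getD (traceL arr.length i) 0 := by
  rw [build_tree, dif_pos h, traceL]
  by_cases h2 : 2 * i + 1 < arr.length
  · have := minVal_build arr (2 * i + 1) h2
    rw [if_pos h2]
    rw [build_tree, dif_pos h2] at this ⊢
    simpa [minVal] using this
  · have : build_tree arr (2 * i + 1) = .nil := (build_tree_eq_nil arr _).mpr h2
    rw [if_neg h2, build_tree, dif_neg h2]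
    simp [minVal, List.getD, h]
termination_by arr.length - i
decreasing_by omega

theorem maxVal_build (arr : List Int) (i : Nat) (h : i < arr.length) :
    maxVal (build_tree arr i) = arr.getD (traceR arr.length i) 0 := by
  rw [build_tree, dif_pos h, traceR]
  by_cases h2 : 2 * i + 2 < arr.length
  · have ih := maxVal_build arr (2 * i + 2) h2
    rw [if_pos h2]
    have hne : build_tree arr (2 * i + 2) ≠ .nil := by
      rw [Ne, build_tree_eq_nil]; omega
    rcases hr : build_tree arr (2 * i + 2) with _ | ⟨w, l2, r2⟩
    · exact absurd hr hne
    · rw [hr] at ih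
      simpa [maxVal] using ih
  · rw [if_neg h2]
    have hr : build_tree arr (2 * i + 2) = .nil := (build_tree_eq_nil arr _).mpr h2
    rw [hr]
    simp [maxVal, List.getD, h]
termination_by arr.length - i
decreasing_by omega

-- ===== VERDICT (by name: the statement is the Claim_ definition above) =====
theorem min_max_product_bst_spec : Claim_equal_min_max_product_bst := by
  intro data _
  unfold Spec_min_max_product_bst min_max_product_bst min_max_product_bst_alt
  by_cases hd : data = []
  · subst hd
    simp [build_tree]
  · have hlen : 0 < data.length := List.length_pos_iff.mpr hd
    have hnil : build_tree data 0 ≠ .nil := by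
      rw [Ne, build_tree_eq_nil]; omega
    rw [if_neg hd]
    rcases hroot : build_tree data 0 with _ | ⟨v, l, r⟩
    · exact absurd hroot hnil
    · have hm := minVal_build data 0 hlen
      have hM := maxVal_build data 0 hlen
      rw [hroot] at hm hM
      simp [hm, hM]
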